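-- pv_equiv track=rewrite | github.com/DanisTeng/DiffGraphV2 | header.py | _function_with_fields_to_lines
-- ===== SOURCE A (Python) =====
-- from typing import List
--
-- def _function_with_fields_to_lines(function_final_name: str, fields: List[str]):
--     """
--     :param function_final_name: The final name of the function
--     :param fields: each element shown in separate line, comma free, can be /*???*/.
--     each field MUST avoid extra space in the front.
--     :return:
--     """
--     result = []
--
--     if not fields:
--         return ['void ' + function_final_name + "();"]
--     elif len(fields) == 1:
--         return ['void %s(%s);' % (function_final_name, fields[0])]
--
--     def is_comment_field(field: str):
--         return field[:2] == "/*"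
--
--     last_non_comment_field = -1
--     for i in range(len(fields)):
--         if not is_comment_field(fields[i]):
--             last_non_comment_field = i
--
--     def may_add_comma(field_id: int):
--         field = fields[field_id]
--         if is_comment_field(field):
--             # no comma for comment field
--             return field
--         elif field_id == last_non_comment_field:
--             return field
--         else:
--             return field + ","
--
--     # at least two fields
--     head = 'void ' + function_final_name + "("
--     result.append(head + may_add_comma(0))
--     var_spaces = " " * len(head)
--
--     for i in range(1, len(fields) - 1):
--         result.append(var_spaces + may_add_comma(i))
--
--     result.append(var_spaces + fields[-1] + ");")
--
--     return result
-- ===== SOURCE B (Python) =====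
-- from typing import List
--
--
-- def _function_with_fields_to_lines(function_final_name: str, fields: List[str]):
--     if not fields:
--         return ['void ' + function_final_name + '();']
--     # one right-to-left pass: comma iff non-comment with a later non-comment field
--     decorated = []
--     seen = False
--     for f in reversed(fields):
--         decorated.append(f + ',' if seen and not f.startswith('/*') else f)
--         if not f.startswith('/*'):
--             seen = True
--     decorated.reverse()
--     head = 'void ' + function_final_name + '('
--     indent = ' ' * len(head)
--     lines = [(head if i == 0 else indent) + d for i, d in enumerate(decorated)]
--     return lines[:-1] + [lines[-1] + ');']
-- ===== Notes on version B (the rewrite author's own statement) =====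
-- stated objective: simpler
-- what changed: Replaces the empty/single/multi three-way branch plus the separate forward scan for the last non-comment index with one guard, a single right-to-left pass carrying a 'seen non-comment' flag to place commas, and one enumerate loop that prefixes head/indent and suffixes ');'.
import Mathlib
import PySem

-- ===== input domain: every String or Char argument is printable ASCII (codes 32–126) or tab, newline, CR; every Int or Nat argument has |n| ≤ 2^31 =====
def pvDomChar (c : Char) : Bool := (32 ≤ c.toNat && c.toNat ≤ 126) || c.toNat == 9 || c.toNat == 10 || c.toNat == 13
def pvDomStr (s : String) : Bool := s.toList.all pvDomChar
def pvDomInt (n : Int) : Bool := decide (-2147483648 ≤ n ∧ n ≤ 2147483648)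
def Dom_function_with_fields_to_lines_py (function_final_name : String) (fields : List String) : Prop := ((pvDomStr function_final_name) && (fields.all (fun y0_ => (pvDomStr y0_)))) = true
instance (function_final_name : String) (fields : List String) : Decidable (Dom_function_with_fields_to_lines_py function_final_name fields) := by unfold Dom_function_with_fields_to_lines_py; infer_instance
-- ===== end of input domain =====

-- ===== PORT A =====
-- B restates A with one guard, a right-to-left comma pass and one enumerate loop (objective: simpler).

-- field[:2] == "/*"
def pvIsCommentField (field : String) : Bool :=
  PySem.Str.slice field none (some 2) == "/*"

-- the forward scan computing last_non_comment
def pvLastNonComment (fields : List String) : Int :=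
  (List.range fields.length).foldl
    (fun acc i => if !pvIsCommentField (fields.getD i "") then (i : Int) else acc) (-1)

-- may_add_comma
def pvMayAddComma (fields : List String) (lastNC : Int) (i : Nat) : String :=
  let field := fields.getD i ""
  if pvIsCommentField field then field
  else if (i : Int) = lastNC then field
  else field ++ ","

def function_with_fields_to_lines_py (function_final_name : String) (fields : List String) : List String :=
  if fields.isEmpty then ["void " ++ function_final_name ++ "();"]
  else if fields.length = 1 then
    ["void " ++ function_final_name ++ "(" ++ fields.getD 0 "" ++ ");"]
  else
    let lastNC := pvLastNonComment fields
    let head := "void " ++ function_final_name ++ "("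
    let varSpaces := String.ofList (List.replicate head.toList.length ' ')
    ([head ++ pvMayAddComma fields lastNC 0]
        ++ (List.range' 1 (fields.length - 2)).map
            (fun i => varSpaces ++ pvMayAddComma fields lastNC i))
      ++ [varSpaces ++ fields.getLastD "" ++ ");"]

-- ===== PORT B =====
-- the loop over reversed(fields) with state (decorated, seen)
def pvDecorateStep (st : List String × Bool) (f : String) : List String × Bool :=
  (st.1 ++ [if st.2 && !(PySem.Str.startswith f "/*") then f ++ "," else f],
   st.2 || !(PySem.Str.startswith f "/*"))

def function_with_fields_to_lines_py_alt (function_final_name : String) (fields : List String) : List String :=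
  if fields.isEmpty then ["void " ++ function_final_name ++ "();"]
  else
    let decorated := (fields.reverse.foldl pvDecorateStep ([], false)).1.reverse
    let head := "void " ++ function_final_name ++ "("
    let indent := String.ofList (List.replicate head.toList.length ' ')
    let lines := (PySem.List.enumerate decorated 0).map
      (fun p => (if p.1 = 0 then head else indent) ++ p.2)
    lines.dropLast ++ [lines.getLastD "" ++ ");"]

-- ===== PRECONDITION & SPEC =====
def Spec_function_with_fields_to_lines_py (function_final_name : String) (fields : List String) (out : List String) : Prop := out = function_with_fields_to_lines_py_alt function_final_name fields
instance (function_final_name : String) (fields : List String) (out : List String) : Decidable (Spec_function_with_fields_to_lines_py function_final_name fields out) := by unfold Spec_function_with_fields_to_lines_py; infer_instance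

-- ===== CLAIM (what is proved, stated in full; the proofs are below) =====
def Claim_equal_function_with_fields_to_lines_py : Prop := ∀ (function_final_name : String) (fields : List String), Dom_function_with_fields_to_lines_py function_final_name fields → Spec_function_with_fields_to_lines_py function_final_name fields (function_with_fields_to_lines_py function_final_name fields)

-- ===== LEMMAS AND PROOFS =====

def pvNC (f : String) : Bool := !pvIsCommentField f

-- recursive form of B's reversed-pass decoration (generalised over the seen flag)
def pvRecDec : List String -> Bool -> List String
  | [], _ => []
  | f :: t, s => (if s && pvNC f then f ++ "," else f) :: pvRecDec t (s || pvNC f)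

-- recursive form of A's last_non_comment forward scan
def pvLastAux (fields : List String) : Nat -> Int
  | 0 => -1
  | n + 1 => if pvNC (fields.getD n "") then (n : Int) else pvLastAux fields n

lemma pvStartswith_eq (f : String) : PySem.Str.startswith f "/*" = pvIsCommentField f := by
  unfold pvIsCommentField
  rw [show ((PySem.Str.slice f none (some 2)) == ("/*" : String))
        = (PySem.List.slice f.toList none (some 2) == ['/', '*']) from ?_]
  · rw [show ((2:Int)) = ((2:Nat):Int) from rfl, PySem.List.slice_to_natCast]
    simp only [PySem.Str.startswith, PySem.Chars.startswith,
      show ("/*" : String).toList = ['/', '*'] from rfl]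
    match f.toList with
    | [] => decide
    | [a] => simp [List.isPrefixOf]
    | a :: b :: t =>
      by_cases ha : a = '/' <;> by_cases hb : b = '*' <;>
        simp [ha, hb, List.isPrefixOf, List.take, eq_comm] <;>
        rw [Bool.beq_comm, @Bool.beq_comm _ _ _ '*']
  · apply Bool.eq_iff_iff.mpr
    simp only [beq_iff_eq]
    rw [← String.toList_inj, PySem.Str.toList_slice,
        show ("/*" : String).toList = ['/', '*'] from rfl]
    exact Iff.rfl

lemma pvFoldl_decorate (l : List String) (acc : List String) (s : Bool) :
    l.foldl pvDecorateStep (acc, s) = (acc ++ pvRecDec l s, s || l.any pvNC) := by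
  induction l generalizing acc s with
  | nil => simp [pvRecDec]
  | cons f t ih =>
    simp only [List.foldl_cons, pvDecorateStep, pvStartswith_eq, pvRecDec, ih, List.any_cons]
    simp [pvNC, Bool.or_assoc]

lemma pvRecDec_length (l : List String) (s : Bool) : (pvRecDec l s).length = l.length := by
  induction l generalizing s with
  | nil => rfl
  | cons f t ih => simp [pvRecDec, ih]

lemma pvRecDec_getElem (l : List String) (s : Bool) (i : Nat) (h : i < l.length)
    (h' : i < (pvRecDec l s).length) :
    (pvRecDec l s)[i] =
      if (s || (l.take i).any pvNC) && pvNC l[i] then l[i] ++ "," else l[i] := by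
  induction l generalizing s i with
  | nil => simp at h
  | cons f t ih =>
    cases i with
    | zero => simp [pvRecDec]
    | succ j =>
      simp only [pvRecDec, List.getElem_cons_succ, List.take_succ_cons, List.any_cons]
      rw [ih]
      · congr 2
        simp [Bool.or_assoc]
      · simpa using h

-- B's decorated list, element by element
lemma pvDecorated_getElem (fields : List String) (i : Nat) (h : i < fields.length)
    (h' : i < (pvRecDec fields.reverse false).reverse.length) :
    (pvRecDec fields.reverse false).reverse[i] =
      if (fields.drop (i + 1)).any pvNC && pvNC fields[i] then fields[i] ++ "," else fields[i] := by
  have hlen : (pvRecDec fields.reverse false).length = fields.length := by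
    rw [pvRecDec_length, List.length_reverse]
  rw [List.getElem_reverse]
  rw [pvRecDec_getElem _ _ _ (by simp [pvRecDec_length]; omega)]
  have hrev : fields.reverse[(pvRecDec fields.reverse false).length - 1 - i]'(by simp [pvRecDec_length]; omega) = fields[i] := by
    rw [List.getElem_reverse]
    congr 1
    simp [pvRecDec_length]
    omega
  have htake : (fields.reverse.take ((pvRecDec fields.reverse false).length - 1 - i))
      = (fields.drop (i + 1)).reverse := by
    rw [List.take_reverse]
    congr 1
    simp [pvRecDec_length]
    omega
  rw [hrev, htake, List.any_reverse, Bool.false_or]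

lemma pvLastNonComment_eq (fields : List String) :
    pvLastNonComment fields = pvLastAux fields fields.length := by
  unfold pvLastNonComment
  generalize fields.length = n
  induction n with
  | zero => rfl
  | succ m ih =>
    rw [List.range_succ, List.foldl_append, ih]
    simp [pvLastAux, pvNC]

lemma pvLastAux_eq_iff (fields : List String) (i m : Nat) (him : i < m)
    (hm : m ≤ fields.length) (hnc : pvNC (fields.getD i "") = true) :
    (pvLastAux fields m = (i : Int)) ↔ (((fields.take m).drop (i + 1)).any pvNC = false) := by
  induction m with
  | zero => omega
  | succ k ih =>
    by_cases hik : i = k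
    · subst hik
      have hdrop : ((fields.take (i + 1)).drop (i + 1)) = [] :=
        List.drop_eq_nil_of_le (by simp)
      simp only [pvLastAux]
      rw [if_pos hnc]
      simp [hdrop]
    · have hik' : i < k := by omega
      have hk : k < fields.length := by omega
      have htk : fields.take (k + 1) = fields.take k ++ [fields[k]] := by
        rw [List.take_add_one]
        simp [List.getElem?_eq_getElem hk]
      simp only [pvLastAux]
      by_cases hnck : pvNC (fields.getD k "") = true
      · rw [if_pos hnck]
        rw [List.getD_eq_getElem fields "" hk] at hnck
        have hfalse : ¬ ((fields.take (k + 1)).drop (i + 1)).any pvNC = false := by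
          rw [htk, List.drop_append_of_le_length (by simp; omega)]
          simp [hnck]
        constructor
        · intro hcast
          exact absurd (by exact_mod_cast hcast : k = i) (by omega)
        · intro hf
          exact absurd hf hfalse
      · rw [if_neg hnck, ih hik' (by omega)]
        rw [htk, List.drop_append_of_le_length (by simp; omega)]
        simp only [List.any_append, List.any_cons, List.any_nil]
        rw [List.getD_eq_getElem fields "" hk] at hnck
        simp only [Bool.not_eq_true] at hnck
        simp [hnck]

-- A's may_add_comma agrees with B's comma rule, element by element
lemma pvMayAddComma_eq (fields : List String) (i : Nat) (h : i < fields.length) :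
    pvMayAddComma fields (pvLastNonComment fields) i =
      if (fields.drop (i + 1)).any pvNC && pvNC fields[i] then fields[i] ++ "," else fields[i] := by
  unfold pvMayAddComma
  rw [pvLastNonComment_eq, List.getD_eq_getElem fields "" h]
  by_cases hc : pvIsCommentField fields[i]
  · simp [hc, pvNC]
  · have hnc : pvNC fields[i] = true := by simp [pvNC, hc]
    rw [if_neg hc]
    have hiff := pvLastAux_eq_iff fields i fields.length h le_rfl
      (by rw [List.getD_eq_getElem fields "" h]; exact hnc)
    rw [List.take_length] at hiff
    by_cases hl : (i : Int) = pvLastAux fields fields.length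
    · rw [if_pos hl]
      have hz : (fields.drop (i + 1)).any pvNC = false := hiff.mp hl.symm
      simp [hz]
    · rw [if_neg hl]
      have hne : ¬ (fields.drop (i + 1)).any pvNC = false := fun hf => hl ((hiff.mpr hf).symm)
      simp only [Bool.not_eq_false] at hne
      simp [hne, hnc]

lemma pvMain (name : String) (fields : List String) :
    function_with_fields_to_lines_py name fields
      = function_with_fields_to_lines_py_alt name fields := by
  unfold function_with_fields_to_lines_py function_with_fields_to_lines_py_alt
  by_cases hemp : fields.isEmpty
  · simp [hemp]
  · rw [if_neg hemp, if_neg hemp]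
    have hne : fields ≠ [] := by
      cases fields
      · simp at hemp
      · simp
    have hn0 : 0 < fields.length := List.length_pos_of_ne_nil hne
    simp only [pvFoldl_decorate, List.nil_append]
    by_cases h1 : fields.length = 1
    · obtain ⟨f, rfl⟩ := List.length_eq_one_iff.mp h1
      simp [pvRecDec, PySem.List.enumerate, List.getLastD, String.append_assoc]
    · have hn2 : 2 ≤ fields.length := by omega
      rw [if_neg h1]
      set hd := "void " ++ name ++ "(" with hhd
      set sp := String.ofList (List.replicate hd.toList.length ' ') with hsp
      set d := (pvRecDec fields.reverse false).reverse with hdd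
      set lines := (PySem.List.enumerate d 0).map
          (fun p => (if p.1 = 0 then hd else sp) ++ p.2) with hlines
      have hdlen : d.length = fields.length := by
        simp [hdd, pvRecDec_length]
      have hlineslen : lines.length = fields.length := by
        simp [hlines, PySem.List.length_enumerate, hdlen]
      have hdget : ∀ (j : Nat) (hj : j < fields.length),
          d[j]'(by omega) =
            if (fields.drop (j + 1)).any pvNC && pvNC (fields[j]'hj)
            then (fields[j]'hj) ++ "," else fields[j]'hj := by
        intro j hj
        exact pvDecorated_getElem fields j hj _
      have hlget : ∀ (j : Nat) (hj : j < fields.length),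
          lines[j]'(by omega) = (if ((j : Nat) : Int) = 0 then hd else sp) ++ d[j]'(by omega) := by
        intro j hj
        simp only [hlines, List.getElem_map, PySem.List.getElem_enumerate, zero_add]
      have hlastget : lines.getLastD "" = lines[fields.length - 1]'(by omega) := by
        rw [List.getLastD_eq_getLast?, List.getLast?_eq_getElem?,
          List.getElem?_eq_getElem (by omega)]
        simp [hlineslen]
      have hflast : fields.getLastD "" = fields[fields.length - 1]'(by omega) := by
        rw [List.getLastD_eq_getLast?, List.getLast?_eq_getElem?,
          List.getElem?_eq_getElem (by omega)]
        rfl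
      apply List.ext_getElem
      · simp [hlineslen]
        omega
      · intro i hiA hiB
        obtain ⟨k, hk⟩ : ∃ k, fields.length = k + 2 := ⟨fields.length - 2, by omega⟩
        have hi : i < fields.length := by
          simp at hiA
          omega
        simp only [List.singleton_append]
        by_cases hilast : i = k + 1
        · subst hilast
          rw [List.getElem_append_right (by simp [hk])]
          have h0A : k + 1 - ((hd ++ pvMayAddComma fields (pvLastNonComment fields) 0) ::
              List.map (fun i => sp ++ pvMayAddComma fields (pvLastNonComment fields) i)
                (List.range' 1 (fields.length - 2))).length = 0 := by simp [hk]
          simp only [h0A, List.getElem_cons_zero]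
          rw [List.getElem_append_right (by simp [hlineslen, hk])]
          have h0B : k + 1 - lines.dropLast.length = 0 := by simp [hlineslen, hk]
          simp only [h0B, List.getElem_cons_zero]
          rw [hlastget, hlget _ (by omega), hdget _ (by omega), hflast]
          have hdn : fields.length - 1 + 1 = fields.length := by omega
          rw [hdn, List.drop_length]
          rw [if_neg (by omega : ¬ (((fields.length - 1 : Nat) : Int) = 0))]
          simp [String.append_assoc]
        · rw [List.getElem_append_left (by simp [hk]; omega)]
          rw [List.getElem_append_left (by simp [hlineslen, hk]; omega)]
          rw [List.getElem_dropLast, hlget i hi, hdget i hi]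
          by_cases hi0 : i = 0
          · subst hi0
            simp only [List.getElem_cons_zero]
            rw [pvMayAddComma_eq fields 0 hi]
            simp
          · obtain ⟨j, rfl⟩ : ∃ j, i = j + 1 := ⟨i - 1, by omega⟩
            rw [List.getElem_cons_succ]
            rw [List.getElem_map, List.getElem_range']
            have hidx : 1 + 1 * j = j + 1 := by omega
            rw [hidx, pvMayAddComma_eq fields (j + 1) hi]
            rw [if_neg (by omega : ¬ (((j + 1 : Nat) : Int) = 0))]

-- ===== VERDICT (by name: the statement is the Claim_ definition above) =====
theorem function_with_fields_to_lines_py_spec : Claim_equal_function_with_fields_to_lines_py := by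
  intro name fields _
  unfold Spec_function_with_fields_to_lines_py
  exact pvMain name fields
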